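-- pv_equiv track=rewrite | github.com/ShawonAshraf/pfcl-sample-solutions-w2122 | set6/compose.py | can_be_composed
-- ===== SOURCE A (Python) =====
-- def word2dict(word):
--     result = { }
--     for c in word:
--         if c in result:
--             result[c] += 1
--         else:
--             result[c] = 1
--     return result
--
-- def can_be_composed(word1, word2):
--     dict1 = word2dict(word1)
--     dict2 = word2dict(word2)
--
--     for c in dict1:
--         if c not in dict2:
--             return False
--
--         if dict2[c] < dict1[c]:
--             return False
--
--     return True
-- ===== SOURCE B (Python) =====
-- def can_be_composed(word1, word2):
--     budget = {}
--     for c in word2: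
--         budget[c] = budget.get(c, 0) + 1
--     for c in word1:
--         n = budget.get(c, 0)
--         if n == 0:
--             return False
--         budget[c] = n - 1
--     return True
-- ===== Notes on version B (the rewrite author's own statement) =====
-- stated objective: alternative
-- what changed: B builds only one count dictionary (a budget from word2) and consumes it while scanning word1 character by character, returning False as soon as a character's budget is exhausted, instead of A's building two count dictionaries and comparing them key by key.
import Mathlib
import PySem

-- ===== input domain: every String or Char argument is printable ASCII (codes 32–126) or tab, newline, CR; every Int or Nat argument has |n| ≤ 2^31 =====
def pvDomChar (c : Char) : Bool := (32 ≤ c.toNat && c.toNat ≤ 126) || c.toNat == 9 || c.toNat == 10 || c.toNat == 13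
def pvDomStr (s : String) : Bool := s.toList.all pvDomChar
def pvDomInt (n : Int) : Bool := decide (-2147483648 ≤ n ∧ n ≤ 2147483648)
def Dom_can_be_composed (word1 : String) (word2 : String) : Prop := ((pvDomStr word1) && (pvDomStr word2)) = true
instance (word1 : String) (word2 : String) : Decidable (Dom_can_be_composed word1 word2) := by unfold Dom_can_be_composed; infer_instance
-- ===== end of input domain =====

-- B builds only one count dictionary (a budget from word2) and consumes it while scanning
-- word1 with early exit, instead of A's two count dictionaries compared key by key; objective: alternative.

-- ===== PORT A =====
-- word2dict: counting loop with the 'if c in result' branch kept as in the Python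
def word2dict (word : String) : PySem.Dict Char Int :=
  word.toList.foldl
    (fun d c => if d.contains c then d.insert c (d.getD c 0 + 1) else d.insert c 1)
    PySem.Dict.empty

-- the 'for c in dict1' loop with its two early returns (d2[c] is guarded by 'c in d2')
def checkKeys (d1 d2 : PySem.Dict Char Int) : List Char → Bool
  | [] => true
  | c :: rest =>
      if !(d2.contains c) then false
      else if d2.getD c 0 < d1.getD c 0 then false
      else checkKeys d1 d2 rest

def can_be_composed (word1 : String) (word2 : String) : Bool :=
  let dict1 := word2dict word1
  let dict2 := word2dict word2
  checkKeys dict1 dict2 dict1.keys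

-- ===== PORT B =====
-- consume: for c in word1: n = budget.get(c, 0); if n == 0: return False; budget[c] = n - 1
def consume (budget : PySem.Dict Char Int) : List Char → Bool
  | [] => true
  | c :: rest =>
      let n := budget.getD c 0
      if n == 0 then false
      else consume (budget.insert c (n - 1)) rest

def can_be_composed_alt (word1 : String) (word2 : String) : Bool :=
  let budget := word2.toList.foldl (fun d c => d.insert c (d.getD c 0 + 1)) PySem.Dict.empty
  consume budget word1.toList

-- ===== PRECONDITION & SPEC =====
def Spec_can_be_composed (word1 : String) (word2 : String) (out : Bool) : Prop := out = can_be_composed_alt word1 word2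
instance (word1 : String) (word2 : String) (out : Bool) : Decidable (Spec_can_be_composed word1 word2 out) := by unfold Spec_can_be_composed; infer_instance

-- ===== CLAIM (what is proved, stated in full; the proofs are below) =====
def Claim_equal_can_be_composed : Prop := ∀ (word1 : String) (word2 : String), Dom_can_be_composed word1 word2 → Spec_can_be_composed word1 word2 (can_be_composed word1 word2)

-- ===== LEMMAS AND PROOFS =====

-- word2dict's counting step is the plain insert-counting step
lemma word2dict_eq_fold (word : String) :
    word2dict word
      = word.toList.foldl (fun d c => d.insert c (d.getD c 0 + 1)) PySem.Dict.empty := by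
  unfold word2dict
  congr 1
  funext d c
  split_ifs with h
  · rfl
  · rw [PySem.Dict.getD_of_not_contains _ _ (by simpa using h)]
    norm_num

lemma getD_word2dict (word : String) (c : Char) :
    (word2dict word).getD c 0 = (word.toList.count c : Int) := by
  rw [word2dict_eq_fold, PySem.Dict.getD_foldl_insert_add_one, PySem.Dict.getD_empty]
  simp

lemma keys_word2dict (word : String) :
    (word2dict word).keys = PySem.Set.ofList word.toList := by
  rw [word2dict_eq_fold, PySem.Dict.keys_foldl_insert, PySem.Dict.keys_empty,
    PySem.Set.ofList_eq_foldl]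
  rfl

lemma contains_word2dict (word : String) (c : Char) :
    (word2dict word).contains c = decide (c ∈ word.toList) := by
  rw [PySem.Dict.contains_eq_decide_mem_keys, keys_word2dict]
  simp [PySem.Set.mem_ofList]

-- A's key loop, characterised
lemma checkKeys_true_iff (d1 d2 : PySem.Dict Char Int) (L : List Char) :
    checkKeys d1 d2 L = true ↔
      ∀ c ∈ L, d2.contains c = true ∧ d1.getD c 0 ≤ d2.getD c 0 := by
  induction L with
  | nil => simp [checkKeys]
  | cons c rest ih =>
      simp only [checkKeys]
      split_ifs with h1 h2
      · simp only [Bool.not_eq_true'] at h1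
        simp [h1]
      · constructor
        · intro h; cases h
        · intro h
          have := (h c (by simp)).2
          omega
      · simp only [Bool.not_eq_true'] at h1
        rw [ih]
        constructor
        · intro h b hb
          rcases List.mem_cons.mp hb with rfl | hb
          · exact ⟨by simpa using h1, by omega⟩
          · exact h b hb
        · intro h b hb
          exact h b (List.mem_cons_of_mem _ hb)

-- B's consuming loop, characterised (budget pointwise nonnegative)
lemma consume_true_iff (l : List Char) (d : PySem.Dict Char Int)
    (hpos : ∀ c, 0 ≤ d.getD c 0) :
    consume d l = true ↔ ∀ c ∈ l, (l.count c : Int) ≤ d.getD c 0 := by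
  induction l generalizing d with
  | nil => simp [consume]
  | cons c rest ih =>
      simp only [consume]
      split_ifs with h
      · simp only [beq_iff_eq] at h
        constructor
        · intro hf; cases hf
        · intro hall
          have h1 := hall c (by simp)
          have h2 : 0 < (c :: rest).count c := List.count_pos_iff.mpr (by simp)
          omega
      · simp only [beq_iff_eq] at h
        have hc0 : 0 < d.getD c 0 := lt_of_le_of_ne (hpos c) (Ne.symm h)
        have hpos' : ∀ b, 0 ≤ (d.insert c (d.getD c 0 - 1)).getD b 0 := by
          intro b
          rw [PySem.Dict.getD_insert]
          split_ifs with hb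
          · omega
          · exact hpos b
        rw [ih _ hpos']
        have hself : ∀ (xs : List Char), (c :: xs).count c = xs.count c + 1 := by
          intro xs; simp
        have hne : ∀ (xs : List Char) (b : Char), c ≠ b →
            (c :: xs).count b = xs.count b := by
          intro xs b hbc; simp [hbc]
        constructor
        · intro hall b hb
          by_cases hbc : c = b
          · subst hbc
            rw [hself]
            by_cases hbr : c ∈ rest
            · have := hall c hbr
              rw [PySem.Dict.getD_insert, if_pos rfl] at this
              push_cast
              omega
            · rw [List.count_eq_zero.mpr hbr]
              omega
          · rcases List.mem_cons.mp hb with rfl | hbr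
            · exact absurd rfl hbc
            · have := hall b hbr
              rw [PySem.Dict.getD_insert, if_neg (fun hh => hbc hh.symm)] at this
              rw [hne _ _ hbc]
              exact this
        · intro hall b hbr
          rw [PySem.Dict.getD_insert]
          split_ifs with hbc
          · subst hbc
            have := hall b (by simp)
            rw [hself] at this
            push_cast at this
            omega
          · have := hall b (List.mem_cons_of_mem _ hbr)
            rw [hne _ _ (fun hh => hbc hh.symm)] at this
            exact this

-- the common specification
lemma canA_iff (w1 w2 : String) :
    can_be_composed w1 w2 = true ↔
      ∀ c ∈ w1.toList, w1.toList.count c ≤ w2.toList.count c := by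
  unfold can_be_composed
  rw [checkKeys_true_iff, keys_word2dict]
  constructor
  · intro h c hc
    obtain ⟨-, h2⟩ := h c (by simpa [PySem.Set.mem_ofList] using hc)
    rw [getD_word2dict, getD_word2dict] at h2
    exact_mod_cast h2
  · intro h c hc
    rw [PySem.Set.mem_ofList] at hc
    refine ⟨?_, ?_⟩
    · rw [contains_word2dict]
      have h1 : 0 < w1.toList.count c := List.count_pos_iff.mpr hc
      have := h c hc
      have : 0 < w2.toList.count c := by omega
      simpa using List.count_pos_iff.mp this
    · rw [getD_word2dict, getD_word2dict]
      exact_mod_cast h c hc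

lemma canB_iff (w1 w2 : String) :
    can_be_composed_alt w1 w2 = true ↔
      ∀ c ∈ w1.toList, w1.toList.count c ≤ w2.toList.count c := by
  unfold can_be_composed_alt
  rw [consume_true_iff _ _ (by
    intro c
    rw [PySem.Dict.getD_foldl_insert_add_one, PySem.Dict.getD_empty]
    positivity)]
  constructor
  · intro h c hc
    have := h c hc
    rw [PySem.Dict.getD_foldl_insert_add_one, PySem.Dict.getD_empty] at this
    omega
  · intro h c hc
    rw [PySem.Dict.getD_foldl_insert_add_one, PySem.Dict.getD_empty]
    have := h c hc
    omega

-- ===== VERDICT (by name: the statement is the Claim_ definition above) =====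
theorem can_be_composed_spec : Claim_equal_can_be_composed := by
  intro w1 w2 _
  unfold Spec_can_be_composed
  exact Bool.eq_iff_iff.mpr ((canA_iff w1 w2).trans (canB_iff w1 w2).symm)
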